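-- pv_equiv track=rewrite | github.com/eliottcassidy2000/math | 04-computation/W_ihalf_analysis.py | forward_edge_dist_dp
-- ===== SOURCE A (Python) =====
-- def forward_edge_dist_dp(T):
--     """DP-based forward edge distribution. O(2^n * n^2)."""
--     n = len(T)
--     deg = n - 1
--     # dp[mask][v][f] = # paths through mask ending at v with f fwd edges
--     # Flatten f into dp to save memory: dp[mask*n + v] = array of size n
--     full = (1 << n) - 1
--
--     # Use dict of (mask, v) -> list of f-counts for memory efficiency
--     dp = {}
--     for v in range(n):
--         key = (1 << v, v)
--         dp[key] = [0] * n
--         dp[key][0] = 1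
--
--     for mask in range(1, 1 << n):
--         for v in range(n):
--             if not (mask & (1 << v)):
--                 continue
--             key = (mask, v)
--             if key not in dp:
--                 continue
--             fv = dp[key]
--             for u in range(n):
--                 if mask & (1 << u):
--                     continue
--                 new_mask = mask | (1 << u)
--                 new_key = (new_mask, u)
--                 if new_key not in dp:
--                     dp[new_key] = [0] * n
--                 if T[v][u]:  # forward
--                     for f in range(deg):
--                         if fv[f]:
--                             dp[new_key][f + 1] += fv[f]
--                 else:  # backward
--                     for f in range(n):
--                         if fv[f]:
--                             dp[new_key][f] += fv[f]
--
--     Nf = [0] * n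
--     for v in range(n):
--         key = (full, v)
--         if key in dp:
--             for f in range(n):
--                 Nf[f] += dp[key][f]
--     return Nf
-- ===== SOURCE B (Python) =====
-- def forward_edge_dist_dp(T):
--     """Top-down memoized recursion: g(mask, v) = distribution of forward-edge
--     counts over orderings of `mask` ending at v; pulled from predecessors."""
--     n = len(T)
--     if n == 0:
--         return []
--     deg = n - 1
--     memo = {}
--
--     def g(mask, v):
--         key = (mask, v)
--         if key in memo:
--             return memo[key]
--         if mask == (1 << v):
--             res = [1] + [0] * (n - 1)
--         else:
--             res = [0] * n
--             rest = mask ^ (1 << v)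
--             for u in range(n):
--                 if rest & (1 << u):
--                     sub = g(rest, u)
--                     if T[u][v]:  # forward edge u -> v
--                         for f in range(deg):
--                             res[f + 1] += sub[f]
--                     else:
--                         for f in range(n):
--                             res[f] += sub[f]
--         memo[key] = res
--         return res
--
--     full = (1 << n) - 1
--     Nf = [0] * n
--     for v in range(n):
--         sub = g(full, v)
--         for f in range(n):
--             Nf[f] += sub[f]
--     return Nf
-- ===== Notes on version B (the rewrite author's own statement) =====
-- stated objective: alternative
-- what changed: Replaces the bottom-up push-style subset DP over an explicit (mask,end)->list dict with a top-down memoized recursion g(mask,v) that pulls the distribution from each predecessor g(mask^(1<<v),u); the dict bookkeeping (key creation, presence tests, in-place pushed increments) disappears.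
import Mathlib
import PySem

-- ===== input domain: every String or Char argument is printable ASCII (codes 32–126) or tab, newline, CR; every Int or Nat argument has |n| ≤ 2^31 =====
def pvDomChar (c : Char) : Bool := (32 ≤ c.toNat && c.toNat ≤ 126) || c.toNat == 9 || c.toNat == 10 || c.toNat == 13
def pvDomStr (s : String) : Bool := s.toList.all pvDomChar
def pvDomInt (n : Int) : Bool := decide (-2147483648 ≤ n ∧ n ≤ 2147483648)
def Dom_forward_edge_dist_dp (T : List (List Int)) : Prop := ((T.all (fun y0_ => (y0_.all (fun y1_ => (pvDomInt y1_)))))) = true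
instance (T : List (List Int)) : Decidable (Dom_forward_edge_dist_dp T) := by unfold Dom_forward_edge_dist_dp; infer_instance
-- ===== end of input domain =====

-- B replaces A's bottom-up push-style dict DP with a top-down recursion pulling from
-- predecessor states (objective: alternative decomposition, same asymptotic cost).
-- Source B's memo dict is a transparent cache of the pure function g; the port of B is the
-- recursion itself (same calls, same values), the cache is dropped.

-- ===== PORT A =====
-- The Python dict dp is a PySem.Dict keyed by the (mask, v) tuples.
-- T[v][u] is ported as (T.getD v []).getD u 0: in range (hence exact) under Pre_.
def pvDp : Type := PySem.Dict (Nat × Nat) (List Int)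

-- `if fv[f]: dp[new_key][f+1] += fv[f]` loop, forward case (range(deg))
def pvFwdA (deg : Nat) (fv cur : List Int) : List Int :=
  (List.range deg).foldl
    (fun c f => if fv.getD f 0 ≠ 0 then c.set (f+1) (c.getD (f+1) 0 + fv.getD f 0) else c) cur

-- backward case (range(n))
def pvBwdA (n : Nat) (fv cur : List Int) : List Int :=
  (List.range n).foldl
    (fun c f => if fv.getD f 0 ≠ 0 then c.set f (c.getD f 0 + fv.getD f 0) else c) cur

-- body of `for u in range(n): …`
def pvStepU (T : List (List Int)) (n deg mask v : Nat) (fv : List Int) (d : pvDp) (u : Nat) : pvDp :=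
  if mask.testBit u then d else
  let nk : Nat × Nat := (mask ||| (1 <<< u), u)
  let d1 : pvDp := match d.get? nk with
    | none => d.insert nk (List.replicate n (0:Int))
    | some _ => d
  let cur := (d1.get? nk).getD []
  let cur' := if (T.getD v []).getD u 0 ≠ 0 then pvFwdA deg fv cur else pvBwdA n fv cur
  d1.insert nk cur'

-- body of `for v in range(n): …`
def pvStepV (T : List (List Int)) (n deg mask : Nat) (d : pvDp) (v : Nat) : pvDp :=
  if ¬ mask.testBit v then d else
  match d.get? (mask, v) with
  | none => d
  | some fv => (List.range n).foldl (pvStepU T n deg mask v fv) d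

-- body of `for mask in range(1, 1 << n): …`
def pvStepM (T : List (List Int)) (n deg : Nat) (d : pvDp) (mask : Nat) : pvDp :=
  (List.range n).foldl (pvStepV T n deg mask) d

-- `for v in range(n): dp[(1 << v, v)] = [0]*n; dp[...][0] = 1`
def pvInit (n : Nat) : pvDp :=
  (List.range n).foldl
    (fun d v => d.insert ((1 <<< v : Nat), v) ((List.replicate n (0:Int)).set 0 1))
    PySem.Dict.empty

def forward_edge_dist_dp (T : List (List Int)) : List Int :=
  let n := T.length
  let deg := n - 1
  let full := (1 <<< n) - 1
  let dp := (List.range' 1 ((1 <<< n) - 1)).foldl (pvStepM T n deg) (pvInit n)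
  (List.range n).foldl (fun Nf v =>
    match dp.get? (full, v) with
    | none => Nf
    | some l => (List.range n).foldl (fun Nf2 f => Nf2.set f (Nf2.getD f 0 + l.getD f 0)) Nf)
    (List.replicate n (0:Int))

-- ===== PORT B =====
-- `for f in range(deg): res[f+1] += sub[f]`
def pvAddShift (deg : Nat) (sub res : List Int) : List Int :=
  (List.range deg).foldl (fun r f => r.set (f+1) (r.getD (f+1) 0 + sub.getD f 0)) res

-- `for f in range(n): res[f] += sub[f]`
def pvAddAll (n : Nat) (sub res : List Int) : List Int :=
  (List.range n).foldl (fun r f => r.set f (r.getD f 0 + sub.getD f 0)) res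

-- Source B's g(mask, v) (memo cache dropped: g is pure, the values are identical)
def pvG (T : List (List Int)) (n deg : Nat) (mask v : Nat) : List Int :=
  if mask = 1 <<< v then 1 :: List.replicate (n-1) (0:Int)
  else
    let rest := mask ^^^ (1 <<< v)
    if h : rest < mask then
      (List.range n).foldl (fun res u =>
        if rest.testBit u then
          let sub := pvG T n deg rest u
          if (T.getD u []).getD v 0 ≠ 0 then pvAddShift deg sub res else pvAddAll n sub res
        else res) (List.replicate n (0:Int))
    else List.replicate n (0:Int)  -- unreachable totality guard (g is only called with bit v set in mask)
termination_by mask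

def forward_edge_dist_dp_alt (T : List (List Int)) : List Int :=
  let n := T.length
  if n = 0 then []
  else
    let deg := n - 1
    let full := (1 <<< n) - 1
    (List.range n).foldl (fun Nf v =>
      let sub := pvG T n deg full v
      (List.range n).foldl (fun Nf2 f => Nf2.set f (Nf2.getD f 0 + sub.getD f 0)) Nf)
      (List.replicate n (0:Int))

-- ===== PRECONDITION & SPEC =====
-- Pre_ excludes exactly the inputs where Python A raises IndexError: some needed
-- off-diagonal entry T[v][u] (u ≠ v < n) is missing (row v shorter than needed).
def Pre_forward_edge_dist_dp (T : List (List Int)) : Prop :=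
  ∀ v ∈ List.range T.length, ∀ u ∈ List.range T.length, u ≠ v → u < (T.getD v []).length
instance (T : List (List Int)) : Decidable (Pre_forward_edge_dist_dp T) := by
  unfold Pre_forward_edge_dist_dp; infer_instance

def pvWitness_forward_edge_dist_dp : List (List Int) := [[0, 1], [1, 0]]

def Spec_forward_edge_dist_dp (T : List (List Int)) (out : List Int) : Prop := out = forward_edge_dist_dp_alt T
instance (T : List (List Int)) (out : List Int) : Decidable (Spec_forward_edge_dist_dp T out) := by unfold Spec_forward_edge_dist_dp; infer_instance

-- ===== CLAIM (what is proved, stated in full; the proofs are below) =====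
def Claim_equal_forward_edge_dist_dp : Prop := ∀ (T : List (List Int)), Dom_forward_edge_dist_dp T → Pre_forward_edge_dist_dp T → Spec_forward_edge_dist_dp T (forward_edge_dist_dp T)

-- ===== LEMMAS AND PROOFS =====

-- ---- list utilities ----
theorem pvSet_getD_self (l : List Int) (i : Nat) : l.set i (l.getD i 0) = l := by
  by_cases h : i < l.length
  · rw [List.getD_eq_getElem l 0 h]; exact List.set_getElem_self h
  · exact List.set_eq_of_length_le (Nat.le_of_not_lt h)

theorem pvFwdA_eq (deg : Nat) (fv cur : List Int) : pvFwdA deg fv cur = pvAddShift deg fv cur := by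
  unfold pvFwdA pvAddShift
  induction deg with
  | zero => rfl
  | succ k ih =>
    rw [List.range_succ, List.foldl_append, List.foldl_append,
        List.foldl_cons, List.foldl_cons, List.foldl_nil, List.foldl_nil, ih]
    by_cases h : fv.getD k 0 ≠ 0
    · rw [if_pos h]
    · rw [if_neg h]
      push_neg at h
      rw [h, add_zero, pvSet_getD_self]

theorem pvBwdA_eq (n : Nat) (fv cur : List Int) : pvBwdA n fv cur = pvAddAll n fv cur := by
  unfold pvBwdA pvAddAll
  induction n with
  | zero => rfl
  | succ k ih =>
    rw [List.range_succ, List.foldl_append, List.foldl_append,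
        List.foldl_cons, List.foldl_cons, List.foldl_nil, List.foldl_nil, ih]
    by_cases h : fv.getD k 0 ≠ 0
    · rw [if_pos h]
    · rw [if_neg h]
      push_neg at h
      rw [h, add_zero, pvSet_getD_self]

-- ---- bit utilities ----
theorem pvTestBit_shift (v i : Nat) : (1 <<< v : Nat).testBit i = decide (v = i) := by
  rw [Nat.one_shiftLeft]; exact Nat.testBit_two_pow ..

theorem pvBitLt (m i n : Nat) (h : m.testBit i = true) (hm : m < 2 ^ n) : i < n := by
  by_contra hc
  have h2 : m < 2 ^ i := lt_of_lt_of_le hm (Nat.pow_le_pow_right (by norm_num) (by omega))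
  rw [Nat.testBit_lt_two_pow h2] at h
  exact Bool.noConfusion h

theorem pvXor_lt (m v : Nat) (h : m.testBit v = true) : m ^^^ (1 <<< v) < m := by
  apply Nat.lt_of_testBit v
  · rw [Nat.testBit_xor, pvTestBit_shift, h]; simp
  · exact h
  · intro j hj
    rw [Nat.testBit_xor, pvTestBit_shift]
    simp [show ¬ v = j by omega]

theorem pvLt_or (m u : Nat) (h : m.testBit u = false) : m < m ||| (1 <<< u) := by
  apply Nat.lt_of_testBit u h
  · rw [Nat.testBit_or, pvTestBit_shift, h]; simp
  · intro j hj
    rw [Nat.testBit_or, pvTestBit_shift]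
    simp [show ¬ u = j by omega]

theorem pvOr_xor (m u : Nat) (h : m.testBit u = false) : (m ||| (1 <<< u)) ^^^ (1 <<< u) = m := by
  apply Nat.eq_of_testBit_eq; intro i
  rw [Nat.testBit_xor, Nat.testBit_or, pvTestBit_shift]
  by_cases hi : u = i
  · subst hi; simp [h]
  · simp [hi]

theorem pvOr_testBit (m u : Nat) : (m ||| (1 <<< u)).testBit u = true := by
  rw [Nat.testBit_or, pvTestBit_shift]; simp

theorem pvXor_eq_or (M u : Nat) (h : M.testBit u = false) : M ^^^ (1 <<< u) = M ||| (1 <<< u) := by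
  apply Nat.eq_of_testBit_eq; intro i
  rw [Nat.testBit_xor, Nat.testBit_or, pvTestBit_shift]
  by_cases hi : u = i
  · subst hi; simp [h]
  · simp [hi]

theorem pvOr_lt_pow (m u n : Nat) (hm : m < 2 ^ n) (hu : u < n) : m ||| (1 <<< u) < 2 ^ n := by
  rw [Nat.one_shiftLeft]
  exact Nat.or_lt_two_pow hm (Nat.pow_lt_pow_right one_lt_two hu)

theorem pvXor_eq_iff (m u M : Nat) (hm : m.testBit u = true) :
    m ^^^ (1 <<< u) = M ↔ (M.testBit u = false ∧ m = M ||| (1 <<< u)) := by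
  constructor
  · intro h
    have hMu : M.testBit u = false := by
      rw [← h, Nat.testBit_xor, pvTestBit_shift, hm]; simp
    refine ⟨hMu, ?_⟩
    rw [← pvXor_eq_or M u hMu, ← h, Nat.xor_xor_cancel_right]
  · rintro ⟨hMu, rfl⟩
    rw [pvOr_xor M u hMu]

theorem pvXor_lt_one (m u : Nat) : (m ^^^ (1 <<< u) < 1) ↔ m = 1 <<< u := by
  constructor
  · intro h
    exact Nat.xor_eq_zero_iff.mp (by omega)
  · intro h
    subst h; simp

theorem pvNe_single (M u : Nat) (hM : 1 ≤ M) (h : M.testBit u = false) :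
    M ||| (1 <<< u) ≠ 1 <<< u := by
  intro he
  have hM0 : M = 0 := by
    apply Nat.eq_of_testBit_eq; intro i
    rw [Nat.zero_testBit]
    by_cases hi : u = i
    · subst hi; exact h
    · have h2 := congrArg (fun x => Nat.testBit x i) he
      simp only [Nat.testBit_or, pvTestBit_shift] at h2
      simpa [hi] using h2
  omega

theorem pvExists_bit (M n : Nat) (hM : 1 ≤ M) (hMn : M < 2 ^ n) :
    ∃ v, v < n ∧ M.testBit v = true := by
  by_contra hc
  push_neg at hc
  have hM0 : M = 0 := by
    apply Nat.eq_of_testBit_eq; intro i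
    rw [Nat.zero_testBit]
    by_cases hin : i < n
    · have := hc i hin
      exact Bool.not_eq_true _ ▸ (by simpa using this)
    · exact Nat.testBit_lt_two_pow
        (lt_of_lt_of_le hMn (Nat.pow_le_pow_right (by norm_num) (by omega)))
  omega

-- ---- facts about B's recursion ----
theorem pvBase_eq (n : Nat) (hn : 1 ≤ n) :
    (List.replicate n (0:Int)).set 0 1 = 1 :: List.replicate (n-1) (0:Int) := by
  obtain ⟨k, rfl⟩ : ∃ k, n = k + 1 := ⟨n - 1, by omega⟩
  simp [List.replicate_succ]

-- partial accumulation at entry (M ||| 1 <<< u, u) after rows v < V have pushed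
def pvPartial (T : List (List Int)) (n deg M u V : Nat) : List Int :=
  (List.range V).foldl (fun res v =>
    if M.testBit v then
      (if (T.getD v []).getD u 0 ≠ 0 then pvAddShift deg (pvG T n deg M v) res
       else pvAddAll n (pvG T n deg M v) res)
    else res) (List.replicate n (0:Int))

theorem pvPartial_succ (T : List (List Int)) (n deg M u V : Nat) :
    pvPartial T n deg M u (V+1)
      = if M.testBit V then
          (if (T.getD V []).getD u 0 ≠ 0 then pvAddShift deg (pvG T n deg M V) (pvPartial T n deg M u V)
           else pvAddAll n (pvG T n deg M V) (pvPartial T n deg M u V))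
        else pvPartial T n deg M u V := by
  unfold pvPartial
  rw [List.range_succ, List.foldl_append, List.foldl_cons, List.foldl_nil]

theorem pvPartial_zero_of_none (T : List (List Int)) (n deg M u : Nat) :
    ∀ V, (¬ ∃ v, v < V ∧ M.testBit v = true) →
      pvPartial T n deg M u V = List.replicate n (0:Int) := by
  intro V
  induction V with
  | zero => intro _; rfl
  | succ V ih =>
    intro h
    rw [pvPartial_succ, if_neg, ih]
    · intro ⟨v, hv, hb⟩; exact h ⟨v, by omega, hb⟩
    · intro hb; exact h ⟨V, by omega, hb⟩

theorem pvG_eq_partial (T : List (List Int)) (n deg M u : Nat) (hM : 1 ≤ M)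
    (hMu : M.testBit u = false) :
    pvG T n deg (M ||| (1 <<< u)) u = pvPartial T n deg M u n := by
  rw [pvG, if_neg (pvNe_single M u hM hMu)]
  have hr : (M ||| (1 <<< u)) ^^^ (1 <<< u) = M := pvOr_xor M u hMu
  simp only [hr]
  rw [dif_pos (pvLt_or M u hMu)]
  rfl

-- the finished-prefix description of A's dict after masks < M are processed
def pvFin (T : List (List Int)) (n deg M m u : Nat) : Option (List Int) :=
  if m.testBit u = true ∧ u < n ∧ m < 2^n ∧ m ^^^ (1 <<< u) < M then some (pvG T n deg m u)
  else none

-- mid-states while pushing out of mask M: row progress profile w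
def pvDState (T : List (List Int)) (n deg M : Nat) (w : Nat → Nat) :
    (Nat × Nat) → Option (List Int) := fun p =>
  if p.1.testBit p.2 = true ∧ p.2 < n ∧ p.1 < 2^n ∧ p.1 ^^^ (1 <<< p.2) < M then
    some (pvG T n deg p.1 p.2)
  else if M.testBit p.2 = false ∧ p.2 < n ∧ p.1 = M ||| (1 <<< p.2)
          ∧ (∃ v, v < w p.2 ∧ M.testBit v = true) then
    some (pvPartial T n deg M p.2 (w p.2))
  else none

theorem pvDState_congr (T : List (List Int)) (n deg M : Nat) (w w' : Nat → Nat)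
    (h : ∀ u, u < n → w u = w' u) : pvDState T n deg M w = pvDState T n deg M w' := by
  funext p
  unfold pvDState
  by_cases h2 : p.2 < n
  · rw [h p.2 h2]
  · rw [if_neg (fun hc => h2 hc.2.1), if_neg (fun hc => h2 hc.2.1), if_neg (fun hc => h2 hc.2.1), if_neg (fun hc => h2 hc.2.1)]

theorem pvStepU_state (T : List (List Int)) (n deg M V : Nat)
    (hV : M.testBit V = true) (w : Nat → Nat) (U : Nat) (hUn : U < n) (hw : w U = V)
    (d : pvDp) (hd : ∀ p, d.get? p = pvDState T n deg M w p) :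
    ∀ p, (pvStepU T n deg M V (pvG T n deg M V) d U).get? p
      = pvDState T n deg M (fun u => if u = U then V + 1 else w u) p := by
  intro p
  unfold pvStepU
  by_cases hMU : M.testBit U = true
  · rw [if_pos hMU, hd]
    obtain ⟨m, u⟩ := p
    unfold pvDState
    dsimp only
    by_cases hc1 : m.testBit u = true ∧ u < n ∧ m < 2^n ∧ m ^^^ 1 <<< u < M
    · rw [if_pos hc1, if_pos hc1]
    · rw [if_neg hc1, if_neg hc1]
      by_cases hpU : u = U
      · subst hpU
        rw [if_neg (fun hc => by have h1 := hc.1; rw [hMU] at h1; exact Bool.noConfusion h1),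
            if_neg (fun hc => by have h1 := hc.1; rw [hMU] at h1; exact Bool.noConfusion h1)]
      · simp only [if_neg hpU]
  · rw [if_neg hMU]
    have hMU' : M.testBit U = false := by simpa using hMU
    have htail : ∀ m u, ((m, u) : Nat × Nat) ≠ ((M ||| (1 <<< U) : Nat), U) →
        pvDState T n deg M (fun u' => if u' = U then V + 1 else w u') (m, u)
          = pvDState T n deg M w (m, u) := by
      intro m u hp
      unfold pvDState
      dsimp only
      by_cases hpU : u = U
      · subst hpU
        have hm : m ≠ M ||| (1 <<< u) := fun he => hp (by rw [he])
        by_cases hc1 : m.testBit u = true ∧ u < n ∧ m < 2^n ∧ m ^^^ 1 <<< u < M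
        · rw [if_pos hc1, if_pos hc1]
        · rw [if_neg hc1, if_neg hc1,
              if_neg (fun hc => hm hc.2.2.1), if_neg (fun hc => hm hc.2.2.1)]
      · simp only [if_neg hpU]
    have hrhs : pvDState T n deg M (fun u' => if u' = U then V + 1 else w u') (M ||| (1 <<< U), U)
        = some (pvPartial T n deg M U (V + 1)) := by
      unfold pvDState
      dsimp only
      rw [if_neg (fun hc => by have h4 := hc.2.2.2; rw [pvOr_xor M U hMU'] at h4; omega)]
      rw [if_pos ⟨hMU', hUn, by trivial, ⟨V, by simp, hV⟩⟩]
      simp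
    have hstep : (if (T.getD V []).getD U 0 ≠ 0 then
          pvAddShift deg (pvG T n deg M V) (pvPartial T n deg M U V)
        else pvAddAll n (pvG T n deg M V) (pvPartial T n deg M U V))
        = pvPartial T n deg M U (V + 1) := by
      rw [pvPartial_succ, if_pos hV]
    dsimp only
    by_cases hex : ∃ v, v < V ∧ M.testBit v = true
    · have hnk : d.get? (M ||| (1 <<< U), U) = some (pvPartial T n deg M U V) := by
        rw [hd]
        unfold pvDState
        dsimp only
        rw [if_neg (fun hc => by have h4 := hc.2.2.2; rw [pvOr_xor M U hMU'] at h4; omega),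
            if_pos ⟨hMU', hUn, rfl, by rw [hw]; exact hex⟩, hw]
      rw [hnk]
      (try dsimp only)
      rw [hnk]
      simp only [Option.getD_some]
      rw [pvFwdA_eq, pvBwdA_eq, hstep, PySem.Dict.get?_insert]
      obtain ⟨m, u⟩ := p
      by_cases hp : ((m, u) : Nat × Nat) = ((M ||| (1 <<< U) : Nat), U)
      · rw [if_pos hp, hp, hrhs]
      · rw [if_neg hp, hd]
        exact (htail m u hp).symm
    · have hnk : d.get? (M ||| (1 <<< U), U) = none := by
        rw [hd]
        unfold pvDState
        dsimp only
        rw [if_neg (fun hc => by have h4 := hc.2.2.2; rw [pvOr_xor M U hMU'] at h4; omega),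
            if_neg (fun hc => hex (hw ▸ hc.2.2.2))]
      rw [hnk]
      (try dsimp only)
      rw [PySem.Dict.get?_insert_self]
      simp only [Option.getD_some]
      rw [pvFwdA_eq, pvBwdA_eq, (pvPartial_zero_of_none T n deg M U V hex).symm, hstep,
          PySem.Dict.get?_insert, PySem.Dict.get?_insert]
      obtain ⟨m, u⟩ := p
      by_cases hp : ((m, u) : Nat × Nat) = ((M ||| (1 <<< U) : Nat), U)
      · rw [if_pos hp, hp, hrhs]
      · rw [if_neg hp, if_neg hp, hd]
        exact (htail m u hp).symm

theorem pvDState_skip (T : List (List Int)) (n deg M V : Nat) (hV : M.testBit V = false) :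
    pvDState T n deg M (fun _ => V) = pvDState T n deg M (fun _ => V + 1) := by
  funext p
  unfold pvDState
  dsimp only
  have hex : (∃ v, v < V ∧ M.testBit v = true) ↔ (∃ v, v < V + 1 ∧ M.testBit v = true) := by
    constructor
    · rintro ⟨v, hv, hb⟩; exact ⟨v, by omega, hb⟩
    · rintro ⟨v, hv, hb⟩
      rcases Nat.lt_or_ge v V with h | h
      · exact ⟨v, h, hb⟩
      · have hvV : v = V := by omega
        subst hvV; rw [hV] at hb; exact absurd hb (by simp)
  have hpp : pvPartial T n deg M p.2 (V+1) = pvPartial T n deg M p.2 V := by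
    rw [pvPartial_succ, if_neg (by simp [hV])]
  rw [hpp]
  simp only [hex]

theorem pvStepV_state (T : List (List Int)) (n deg M : Nat)
    (hM1 : 1 ≤ M) (hMn : M < 2^n) (V : Nat) (hVn : V < n)
    (d : pvDp) (hd : ∀ p, d.get? p = pvDState T n deg M (fun _ => V) p) :
    ∀ p, (pvStepV T n deg M d V).get? p = pvDState T n deg M (fun _ => V + 1) p := by
  intro p
  unfold pvStepV
  by_cases hV : M.testBit V = true
  · rw [if_neg (by simp [hV])]
    have hdv : d.get? (M, V) = some (pvG T n deg M V) := by
      rw [hd]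
      unfold pvDState
      dsimp only
      rw [if_pos ⟨hV, pvBitLt M V n hV hMn, hMn, pvXor_lt M V hV⟩]
    rw [hdv]
    have haux : ∀ U, U ≤ n → ∀ p,
        ((List.range U).foldl (pvStepU T n deg M V (pvG T n deg M V)) d).get? p
          = pvDState T n deg M (fun u => if u < U then V + 1 else V) p := by
      intro U
      induction U with
      | zero =>
        intro _ p
        rw [List.range_zero, List.foldl_nil, hd]
        exact congrFun (pvDState_congr _ _ _ _ _ _ (fun u _ => by rw [if_neg (by omega)])) p
      | succ U ih =>
        intro hU p
        rw [List.range_succ, List.foldl_append, List.foldl_cons, List.foldl_nil]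
        rw [pvStepU_state T n deg M V hV _ U (by omega) (by rw [if_neg (by omega)]) _
              (fun q => ih (by omega) q) p]
        refine congrFun (pvDState_congr _ _ _ _ _ _ (fun u _ => ?_)) p
        by_cases h : u = U
        · subst h; rw [if_pos rfl, if_pos (by omega)]
        · rw [if_neg h]
          by_cases h2 : u < U
          · rw [if_pos h2, if_pos (by omega)]
          · rw [if_neg h2, if_neg (by omega)]
    rw [haux n le_rfl p]
    exact congrFun (pvDState_congr _ _ _ _ _ _ (fun u hu => by rw [if_pos hu])) p
  · rw [if_pos (by simpa using hV), hd]
    exact congrFun (pvDState_skip T n deg M V (by simpa using hV)) p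

theorem pvStepM_inv (T : List (List Int)) (n deg M : Nat)
    (hn : 1 ≤ n) (hM1 : 1 ≤ M) (hMn : M < 2^n) (d : pvDp)
    (hd : ∀ m u, d.get? (m, u) = pvFin T n deg M m u) :
    ∀ m u, (pvStepM T n deg d M).get? (m, u) = pvFin T n deg (M+1) m u := by
  have hd0 : ∀ p : Nat × Nat, d.get? p = pvDState T n deg M (fun _ => 0) p := by
    intro p
    obtain ⟨m, u⟩ := p
    rw [hd m u]
    unfold pvDState pvFin
    dsimp only
    rw [if_neg (fun hc => by obtain ⟨v, hv, _⟩ := hc.2.2.2; omega :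
        ¬(M.testBit u = false ∧ u < n ∧ m = M ||| 1 <<< u ∧ ∃ v, v < (0:Nat) ∧ M.testBit v = true))]
  have hloop : ∀ V, V ≤ n → ∀ p,
      ((List.range V).foldl (pvStepV T n deg M) d).get? p
        = pvDState T n deg M (fun _ => V) p := by
    intro V
    induction V with
    | zero => intro _ p; rw [List.range_zero, List.foldl_nil]; exact hd0 p
    | succ V ih =>
      intro hV p
      rw [List.range_succ, List.foldl_append, List.foldl_cons, List.foldl_nil]
      exact pvStepV_state T n deg M hM1 hMn V (by omega) _ (fun q => ih (by omega) q) p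
  intro m u
  show ((List.range n).foldl (pvStepV T n deg M) d).get? (m, u) = _
  rw [hloop n le_rfl (m, u)]
  unfold pvDState pvFin
  dsimp only
  by_cases h1 : m.testBit u = true ∧ u < n ∧ m < 2^n ∧ m ^^^ 1 <<< u < M
  · rw [if_pos h1, if_pos ⟨h1.1, h1.2.1, h1.2.2.1, by omega⟩]
  · rw [if_neg h1]
    by_cases h2 : M.testBit u = false ∧ u < n ∧ m = M ||| 1 <<< u ∧ ∃ v, v < n ∧ M.testBit v = true
    · rw [if_pos h2]
      obtain ⟨hMu, hun, hm, _⟩ := h2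
      have hg := pvG_eq_partial T n deg M u hM1 hMu
      rw [if_pos ⟨by rw [hm]; exact pvOr_testBit M u, hun,
            by rw [hm]; exact pvOr_lt_pow M u n hMn hun,
            by rw [hm, pvOr_xor M u hMu]; omega⟩]
      rw [hm, ← hg]
    · rw [if_neg h2, if_neg (fun hc => ?_)]
      obtain ⟨hb, hun, hlt, hx⟩ := hc
      rcases Nat.lt_or_ge (m ^^^ 1 <<< u) M with hlt2 | hge
      · exact h1 ⟨hb, hun, hlt, hlt2⟩
      · have hxM : m ^^^ 1 <<< u = M := by omega
        obtain ⟨hMu, hm⟩ := (pvXor_eq_iff m u M hb).mp hxM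
        exact h2 ⟨hMu, hun, hm, pvExists_bit M n hM1 hMn⟩

theorem pvInit_aux (n : Nat) : ∀ (k : Nat) (m u : Nat),
    ((List.range k).foldl
      (fun (d : pvDp) v => d.insert ((1 <<< v : Nat), v) ((List.replicate n (0:Int)).set 0 1))
      PySem.Dict.empty).get? (m, u)
      = if m = 1 <<< u ∧ u < k then some ((List.replicate n (0:Int)).set 0 1) else none := by
  intro k
  induction k with
  | zero =>
    intro m u
    rw [List.range_zero, List.foldl_nil, PySem.Dict.get?_empty, if_neg (fun hc => by omega)]
  | succ k ih =>
    intro m u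
    rw [List.range_succ, List.foldl_append, List.foldl_cons, List.foldl_nil,
        PySem.Dict.get?_insert]
    by_cases h : ((m, u) : Nat × Nat) = ((1 <<< k : Nat), k)
    · rw [if_pos h]
      have hm : m = 1 <<< k := congrArg Prod.fst h
      have hu : u = k := congrArg Prod.snd h
      rw [if_pos ⟨by rw [hm, hu], by omega⟩]
    · rw [if_neg h, ih]
      by_cases h2 : m = 1 <<< u ∧ u < k
      · rw [if_pos h2, if_pos ⟨h2.1, by omega⟩]
      · rw [if_neg h2, if_neg (fun hc => ?_)]
        rcases Nat.lt_or_ge u k with hk | hk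
        · exact h2 ⟨hc.1, hk⟩
        · have hu : u = k := by omega
          exact h (by rw [hc.1, hu])

theorem pvInvInit (T : List (List Int)) (n deg : Nat) (hn : 1 ≤ n) :
    ∀ m u, (pvInit n).get? (m, u) = pvFin T n deg 1 m u := by
  intro m u
  unfold pvInit pvFin
  rw [pvInit_aux n n m u]
  by_cases h : m = 1 <<< u ∧ u < n
  · obtain ⟨hm, hu⟩ := h
    rw [if_pos ⟨hm, hu⟩]
    subst hm
    rw [if_pos ⟨by rw [pvTestBit_shift]; simp, hu,
          by rw [Nat.one_shiftLeft]; exact Nat.pow_lt_pow_right one_lt_two hu,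
          by rw [Nat.xor_self]; omega⟩]
    rw [pvBase_eq n hn, pvG, if_pos rfl]
  · rw [if_neg h, if_neg (fun hc => ?_)]
    obtain ⟨hb, hu2, hlt, hx⟩ := hc
    exact h ⟨(pvXor_lt_one m u).mp hx, hu2⟩

theorem pvLoop_inv (T : List (List Int)) (n deg : Nat) (hn : 1 ≤ n) :
    ∀ (k Mst : Nat) (d : pvDp), 1 ≤ Mst → Mst + k ≤ 2^n →
      (∀ m u, d.get? (m, u) = pvFin T n deg Mst m u) →
      ∀ m u, ((List.range' Mst k).foldl (pvStepM T n deg) d).get? (m, u)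
        = pvFin T n deg (Mst + k) m u := by
  intro k
  induction k with
  | zero =>
    intro Mst d _ _ hd m u
    simpa using hd m u
  | succ k ih =>
    intro Mst d hM1 hMk hd m u
    rw [List.range'_succ, List.foldl_cons]
    have := ih (Mst + 1) (pvStepM T n deg d Mst) (by omega) (by omega)
      (pvStepM_inv T n deg Mst hn hM1 (by omega) d hd)
    have h2 := this m u
    rw [h2]
    congr 1
    omega

theorem forward_edge_dist_dp_main : ∀ (T : List (List Int)),
    forward_edge_dist_dp T = forward_edge_dist_dp_alt T := by
  intro T
  by_cases hn : T.length = 0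
  · have hT : T = [] := List.length_eq_zero_iff.mp hn
    subst hT
    rfl
  · have hn1 : 1 ≤ T.length := by omega
    have hpow : (1 <<< T.length : Nat) = 2 ^ T.length := Nat.one_shiftLeft _
    have h2n1 : 1 ≤ 2 ^ T.length := Nat.one_le_two_pow
    unfold forward_edge_dist_dp forward_edge_dist_dp_alt
    rw [if_neg hn]
    dsimp only
    apply PySem.List.foldl_congr_mem
    intro acc v hv
    have hvn : v < T.length := List.mem_range.mp hv
    have hkey : ((List.range' 1 ((1 <<< T.length) - 1)).foldl
          (pvStepM T T.length (T.length - 1)) (pvInit T.length)).get? ((1 <<< T.length) - 1, v)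
        = some (pvG T T.length (T.length - 1) ((1 <<< T.length) - 1) v) := by
      rw [hpow]
      have hb : ((2:Nat) ^ T.length - 1).testBit v = true := by
        rw [Nat.testBit_two_pow_sub_one]
        simpa using hvn
      rw [pvLoop_inv T T.length (T.length - 1) hn1 (2 ^ T.length - 1) 1 (pvInit T.length)
            le_rfl (by omega) (pvInvInit T T.length (T.length - 1) hn1) (2 ^ T.length - 1) v]
      unfold pvFin
      rw [if_pos ⟨hb, hvn, by omega, lt_of_lt_of_le (pvXor_lt _ v hb) (by omega)⟩]
    rw [hkey]

-- ===== VERDICT (by name: the statement is the Claim_ definition above) =====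
theorem forward_edge_dist_dp_spec : Claim_equal_forward_edge_dist_dp := by
  intro T _ _
  exact forward_edge_dist_dp_main T
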